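-- pv_equiv track=rewrite | github.com/seon-2/coding_test_log | 백준/Silver/11286. 절댓값 힙/절댓값 힙.py | abs_heap
-- ===== SOURCE A (Python) =====
-- import heapq
--
-- def abs_heap(operations):
--     neg_heap = []  # 음수 힙
--     pos_heap = []  # 양수 힙
--     output = []
--
--     for op in operations:
--         if op != 0:
--             value = abs(op)
--             if op < 0:
--                 heapq.heappush(neg_heap, (value, op))
--                 heapq.heappush(pos_heap, (-value, -op))
--             else:
--                 heapq.heappush(neg_heap, (value, op))
--                 heapq.heappush(pos_heap, (-value, op))
--         else:
--             if not neg_heap: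
--                 output.append(0)
--             else:
--                 value = heapq.heappop(neg_heap)[1]
--                 output.append(value)
--                 heapq.heappop(pos_heap)
--
--     return output
-- ===== SOURCE B (Python) =====
-- import bisect
--
-- def abs_heap(operations):
--     pq = []      # single list kept sorted by (abs(value), value)
--     output = []
--     for op in operations:
--         if op != 0:
--             bisect.insort(pq, (abs(op), op))
--         else:
--             if not pq:
--                 output.append(0)
--             else:
--                 output.append(pq.pop(0)[1])
--     return output
-- ===== Notes on version B (the rewrite author's own statement) =====
-- stated objective: simpler
-- what changed: Replaces the two mirrored binary heaps with a single list kept sorted by the tuple (abs(v), v) via bisect.insort, popping index 0 on a zero operation.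
import Mathlib
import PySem

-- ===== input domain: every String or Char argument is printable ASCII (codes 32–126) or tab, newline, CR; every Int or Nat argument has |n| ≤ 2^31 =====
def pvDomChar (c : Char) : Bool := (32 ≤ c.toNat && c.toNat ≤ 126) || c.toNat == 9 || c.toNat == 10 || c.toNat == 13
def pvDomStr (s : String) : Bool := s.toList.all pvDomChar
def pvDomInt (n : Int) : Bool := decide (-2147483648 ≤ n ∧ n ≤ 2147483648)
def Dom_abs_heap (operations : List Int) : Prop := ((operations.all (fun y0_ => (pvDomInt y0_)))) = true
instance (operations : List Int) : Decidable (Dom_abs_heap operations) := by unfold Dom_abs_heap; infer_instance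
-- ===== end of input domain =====

-- B replaces A's two mirrored binary heaps with a single list kept sorted by (abs(v), v); same outputs, simpler state.

-- ===== PORT A =====
-- Python tuple comparison (a, b) < (c, d), lexicographic on Int × Int
def pvHLt (a b : Int × Int) : Bool := a.1 < b.1 || (a.1 == b.1 && a.2 < b.2)

-- heapq._siftdown(heap, startpos, pos) with newitem = heap[pos] passed explicitly (CPython reads it first)
def pvSiftdown (h : List (Int × Int)) (startpos pos : Nat) (newitem : Int × Int) : List (Int × Int) :=
  if _hp : startpos < pos then
    -- parentpos = (pos - 1) >> 1, parent = heap[parentpos]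
    if pvHLt newitem (h[(pos - 1) / 2]!) then
      pvSiftdown (h.set pos (h[(pos - 1) / 2]!)) startpos ((pos - 1) / 2) newitem
    else h.set pos newitem
  else h.set pos newitem
termination_by pos
decreasing_by omega

-- heapq.heappush: append then _siftdown(heap, 0, len(heap)-1)
def pvHeappush (h : List (Int × Int)) (item : Int × Int) : List (Int × Int) :=
  pvSiftdown (h ++ [item]) 0 h.length item

-- the smaller-child selection of heapq._siftup (childpos update)
def pvChild (h : List (Int × Int)) (pos : Nat) : Nat :=
  if 2 * pos + 2 < h.length && !(pvHLt h[2 * pos + 1]! h[2 * pos + 2]!) then 2 * pos + 2 else 2 * pos + 1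

-- heapq._siftup(heap, pos): bubble the hole down along the smaller child, then _siftdown
def pvSiftupLoop (h : List (Int × Int)) (startpos pos : Nat) (newitem : Int × Int) : List (Int × Int) :=
  if _hc : 2 * pos + 1 < h.length then
    pvSiftupLoop (h.set pos (h[pvChild h pos]!)) startpos (pvChild h pos) newitem
  else pvSiftdown h startpos pos newitem
termination_by h.length - pos
decreasing_by simp only [List.length_set, pvChild]; split <;> omega

-- heapq.heappop; Python raises IndexError on an empty heap — unreachable in abs_heap (both heaps are
-- nonempty at every pop), so the [] case returns a junk value never used
def pvHeappop (h : List (Int × Int)) : (Int × Int) × List (Int × Int) :=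
  match h.getLast? with
  | none => ((0, 0), [])
  | some lastelt =>
    let rest := h.dropLast
    if rest.isEmpty then (lastelt, rest)
    else
      let returnitem := rest[0]!
      (returnitem, pvSiftupLoop (rest.set 0 lastelt) 0 0 lastelt)

-- the loop body of A (state: neg_heap, pos_heap, output)
def pvStepA (st : List (Int × Int) × List (Int × Int) × List Int) (op : Int) :
    List (Int × Int) × List (Int × Int) × List Int :=
  let neg := st.1; let pos := st.2.1; let out := st.2.2
  if op ≠ 0 then
    let value := |op|
    if op < 0 then (pvHeappush neg (value, op), pvHeappush pos (-value, -op), out)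
    else (pvHeappush neg (value, op), pvHeappush pos (-value, op), out)
  else
    if neg.isEmpty then (neg, pos, out ++ [0])
    else
      let r := pvHeappop neg
      let r2 := pvHeappop pos
      (r.2, r2.2, out ++ [r.1.2])

def abs_heap (operations : List Int) : List Int :=
  (operations.foldl pvStepA ([], [], [])).2.2

-- ===== PORT B =====
-- bisect.insort into a sorted list (inserts after equal elements, like insort_right)
def pvInsort (x : Int × Int) : List (Int × Int) → List (Int × Int)
  | [] => [x]
  | y :: ys => if pvHLt x y then x :: y :: ys else y :: pvInsort x ys

-- the loop body of B (state: pq, output); pq.pop(0) is the head split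
def pvStepB (st : List (Int × Int) × List Int) (op : Int) : List (Int × Int) × List Int :=
  if op ≠ 0 then (pvInsort (|op|, op) st.1, st.2)
  else
    match st.1 with
    | [] => ([], st.2 ++ [0])
    | p :: rest => (rest, st.2 ++ [p.2])

def abs_heap_alt (operations : List Int) : List Int :=
  (operations.foldl pvStepB ([], [])).2

-- ===== PRECONDITION & SPEC =====
def Spec_abs_heap (operations : List Int) (out : List Int) : Prop := out = abs_heap_alt operations
instance (operations : List Int) (out : List Int) : Decidable (Spec_abs_heap operations out) := by unfold Spec_abs_heap; infer_instance

-- ===== CLAIM (what is proved, stated in full; the proofs are below) =====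
def Claim_equal_abs_heap : Prop := ∀ (operations : List Int), Dom_abs_heap operations → Spec_abs_heap operations (abs_heap operations)

-- ===== LEMMAS AND PROOFS =====

-- order facts about the lexicographic comparison
theorem pvHLt_tt (a b : Int × Int) : pvHLt a b = true ↔ (a.1 < b.1 ∨ (a.1 = b.1 ∧ a.2 < b.2)) := by
  simp [pvHLt]

theorem pvHLt_ff (a b : Int × Int) : pvHLt a b = false ↔ (b.1 < a.1 ∨ (b.1 = a.1 ∧ b.2 ≤ a.2)) := by
  simp [pvHLt]; omega

theorem pvHLt_irrefl (a : Int × Int) : pvHLt a a = false := by simp [pvHLt_ff]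

theorem pvHLt_asymm {a b : Int × Int} (h : pvHLt a b = true) : pvHLt b a = false := by
  rw [pvHLt_tt] at h; rw [pvHLt_ff]; omega

theorem pvHLt_antisymm {a b : Int × Int} (h1 : pvHLt a b = false) (h2 : pvHLt b a = false) : a = b := by
  rw [pvHLt_ff] at h1 h2
  obtain ⟨a1, a2⟩ := a; obtain ⟨b1, b2⟩ := b
  simp_all; omega

theorem pvHLt_trans_ff {a b c : Int × Int} (h1 : pvHLt a b = false) (h2 : pvHLt b c = false) :
    pvHLt a c = false := by
  rw [pvHLt_ff] at h1 h2 ⊢; omega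

-- a ≥ b and c < b imply ¬ (a < c)
theorem pvHLt_trans_ft {a b c : Int × Int} (h1 : pvHLt a b = false) (h2 : pvHLt c b = true) :
    pvHLt a c = false := by
  rw [pvHLt_ff] at h1 ⊢; rw [pvHLt_tt] at h2; omega

-- permutation plumbing for List.set
theorem perm_set_cons {α : Type} (xs : List α) (i : Nat) (hi : i < xs.length) (a c : α) :
    (a :: xs.set i c).Perm (c :: xs.set i a) := by
  induction xs generalizing i with
  | nil => simp at hi
  | cons x t ih =>
    cases i with
    | zero => simpa using List.Perm.swap c a t
    | succ m =>
      simp only [List.set_cons_succ]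
      exact ((List.Perm.swap x a _).trans ((ih m (by simpa using hi)).cons x)).trans (List.Perm.swap c x _)

theorem set_set_perm {α : Type} (l : List α) (i j : Nat) (hi : i < l.length) (hj : j < l.length)
    (hne : i ≠ j) (b : α) : ((l.set i (l[j]'hj)).set j b).Perm (l.set i b) := by
  induction l generalizing i j with
  | nil => simp at hi
  | cons x xs ih =>
    match i, j with
    | 0, 0 => exact absurd rfl hne
    | 0, m + 1 =>
      simp only [List.getElem_cons_succ, List.set_cons_zero, List.set_cons_succ]
      have h := perm_set_cons xs m (by simpa using hj) (xs[m]'(by simpa using hj)) b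
      rwa [List.set_getElem_self] at h
    | k + 1, 0 =>
      simp only [List.getElem_cons_zero, List.set_cons_succ, List.set_cons_zero]
      exact perm_set_cons xs k (by simpa using hi) b x
    | k + 1, m + 1 =>
      simp only [List.getElem_cons_succ, List.set_cons_succ]
      exact (ih k m (by simpa using hi) (by simpa using hj) (by omega)).cons x

-- the binary-heap property (min at every parent)
def IsHeap (h : List (Int × Int)) : Prop :=
  ∀ i c : Nat, (c = 2 * i + 1 ∨ c = 2 * i + 2) → (hc : c < h.length) → (hi : i < h.length) →
    pvHLt (h[c]'hc) (h[i]'hi) = false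

theorem isHeap_root_le {h : List (Int × Int)} (hh : IsHeap h) :
    ∀ i, (hi : i < h.length) → (h0 : 0 < h.length) → pvHLt (h[i]'hi) (h[0]'h0) = false := by
  intro i
  induction i using Nat.strong_induction_on with
  | _ i IH =>
    intro hi h0
    rcases Nat.eq_zero_or_pos i with h | h
    · subst h; exact pvHLt_irrefl _
    · have hp : (i - 1) / 2 < i := by omega
      have hor : i = 2 * ((i - 1) / 2) + 1 ∨ i = 2 * ((i - 1) / 2) + 2 := by omega
      have h1 := hh ((i - 1) / 2) i hor hi (by omega)
      exact pvHLt_trans_ff h1 (IH _ hp (by omega) h0)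

theorem siftdown_perm (h : List (Int × Int)) (startpos pos : Nat) (newitem : Int × Int)
    (hp : pos < h.length) : (pvSiftdown h startpos pos newitem).Perm (h.set pos newitem) := by
  induction pos using Nat.strong_induction_on generalizing h with
  | _ pos IH =>
    rw [pvSiftdown]
    split_ifs with hsp hlt
    · have hplt : (pos - 1) / 2 < pos := by omega
      have hpl : (pos - 1) / 2 < h.length := by omega
      have hset : (pos - 1) / 2 < (h.set pos (h[(pos - 1) / 2]!)).length := by simpa using hpl
      have h1 := IH ((pos - 1) / 2) hplt (h.set pos (h[(pos - 1) / 2]!)) hset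
      refine h1.trans ?_
      rw [getElem!_pos h ((pos - 1) / 2) hpl]
      exact set_set_perm h pos ((pos - 1) / 2) hp hpl (by omega) newitem
    · exact List.Perm.refl _
    · exact List.Perm.refl _

theorem getElem_set_ne' (l : List (Int × Int)) (p j : Nat) (v : Int × Int)
    (hj : j < (l.set p v).length) (hne : p ≠ j) :
    (l.set p v)[j]'hj = l[j]'(by simpa using hj) := by
  simp [hne]

theorem getElem_set_eq' (l : List (Int × Int)) (p : Nat) (v : Int × Int)
    (hj : p < (l.set p v).length) : (l.set p v)[p]'hj = v := by
  simp

theorem siftdown_isHeap (h : List (Int × Int)) (pos : Nat) (newitem : Int × Int) (hp : pos < h.length)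
    (H1 : ∀ i c : Nat, (c = 2 * i + 1 ∨ c = 2 * i + 2) → (hc : c < h.length) → (hi : i < h.length) →
      i ≠ pos → c ≠ pos → pvHLt (h[c]'hc) (h[i]'hi) = false)
    (H2 : ∀ c : Nat, (c = 2 * pos + 1 ∨ c = 2 * pos + 2) → (hc : c < h.length) →
      pvHLt (h[c]'hc) newitem = false)
    (H3 : ∀ c : Nat, (c = 2 * pos + 1 ∨ c = 2 * pos + 2) → (hc : c < h.length) → 0 < pos →
      (hpp : (pos - 1) / 2 < h.length) → pvHLt (h[c]'hc) (h[(pos - 1) / 2]'hpp) = false) :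
    IsHeap (pvSiftdown h 0 pos newitem) := by
  induction pos using Nat.strong_induction_on generalizing h with
  | _ pos IH =>
    rw [pvSiftdown]
    split_ifs with hsp hlt
    · -- recursive case: move parent down, recurse at parentpos
      have hpl : (pos - 1) / 2 < h.length := by omega
      rw [getElem!_pos h ((pos - 1) / 2) hpl] at hlt ⊢
      apply IH ((pos - 1) / 2) (by omega) (h.set pos (h[(pos - 1) / 2]'hpl)) (by simpa using hpl)
      · -- H1'
        intro i c hor hc hi hip hcp
        have hln : (h.set pos (h[(pos - 1) / 2]'hpl)).length = h.length := by simp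
        by_cases hcpos : c = pos
        · exact absurd (by omega : i = (pos - 1) / 2) hip
        · by_cases hipos : i = pos
          · rw [getElem_set_ne' _ _ _ _ hc (by omega)]
            subst hipos
            rw [getElem_set_eq']
            exact H3 c (by omega) (by omega) (by omega) hpl
          · rw [getElem_set_ne' _ _ _ _ hc (by omega), getElem_set_ne' _ _ _ _ hi (by omega)]
            exact H1 i c hor (by omega) (by omega) hipos hcpos
      · -- H2'
        intro c hor hc
        have hln : (h.set pos (h[(pos - 1) / 2]'hpl)).length = h.length := by simp
        by_cases hcpos : c = pos
        · subst hcpos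
          rw [getElem_set_eq']
          exact pvHLt_asymm hlt
        · rw [getElem_set_ne' _ _ _ _ hc (by omega)]
          exact pvHLt_trans_ft (H1 ((pos - 1) / 2) c (by omega) (by omega) hpl (by omega) hcpos) hlt
      · -- H3'
        intro c hor hc h0 hgp
        have hln : (h.set pos (h[(pos - 1) / 2]'hpl)).length = h.length := by simp
        have hgpl : (((pos - 1) / 2) - 1) / 2 < h.length := by omega
        by_cases hcpos : c = pos
        · subst hcpos
          rw [getElem_set_eq', getElem_set_ne' _ _ _ _ hgp (by omega)]
          exact H1 ((((c - 1) / 2) - 1) / 2) ((c - 1) / 2) (by omega) hpl hgpl (by omega) (by omega)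
        · rw [getElem_set_ne' _ _ _ _ hc (by omega), getElem_set_ne' _ _ _ _ hgp (by omega)]
          exact pvHLt_trans_ff
            (H1 ((pos - 1) / 2) c (by omega) (by omega) hpl (by omega) hcpos)
            (H1 ((((pos - 1) / 2) - 1) / 2) ((pos - 1) / 2) (by omega) hpl hgpl (by omega) (by omega))
    · -- parent small enough: place newitem at pos
      have hpl : (pos - 1) / 2 < h.length := by omega
      rw [getElem!_pos h ((pos - 1) / 2) hpl] at hlt
      replace hlt : pvHLt newitem (h[(pos - 1) / 2]'hpl) = false := by simpa using hlt
      intro i c hor hc hi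
      have hln : (h.set pos newitem).length = h.length := by simp
      by_cases hcpos : c = pos
      · have hieq : i = (pos - 1) / 2 := by omega
        subst hcpos
        rw [getElem_set_eq', getElem_set_ne' _ _ _ _ hi (by omega)]
        subst hieq
        exact hlt
      · by_cases hipos : i = pos
        · subst hipos
          rw [getElem_set_ne' _ _ _ _ hc (by omega), getElem_set_eq']
          exact H2 c (by omega) (by omega)
        · rw [getElem_set_ne' _ _ _ _ hc (by omega), getElem_set_ne' _ _ _ _ hi (by omega)]
          exact H1 i c hor (by omega) (by omega) hipos hcpos
    · -- pos = 0
      have hpos0 : pos = 0 := by omega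
      subst hpos0
      intro i c hor hc hi
      have hln : (h.set 0 newitem).length = h.length := by simp
      have hcpos : c ≠ 0 := by omega
      by_cases hipos : i = 0
      · subst hipos
        rw [getElem_set_ne' _ _ _ _ hc (by omega), getElem_set_eq']
        exact H2 c (by simpa using hor) (by omega)
      · rw [getElem_set_ne' _ _ _ _ hc (by omega), getElem_set_ne' _ _ _ _ hi (by omega)]
        exact H1 i c hor (by omega) (by omega) hipos hcpos

theorem pvChild_facts (h : List (Int × Int)) (pos : Nat) (hc : 2 * pos + 1 < h.length) :
    pvChild h pos < h.length ∧ pos < pvChild h pos ∧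
      (pvChild h pos = 2 * pos + 1 ∨ pvChild h pos = 2 * pos + 2) := by
  unfold pvChild
  split
  · rename_i hb
    simp only [Bool.and_eq_true, decide_eq_true_eq] at hb
    omega
  · omega

theorem siftupLoop_perm (h : List (Int × Int)) (startpos pos : Nat) (newitem : Int × Int)
    (hp : pos < h.length) : (pvSiftupLoop h startpos pos newitem).Perm (h.set pos newitem) := by
  suffices H : ∀ n (h : List (Int × Int)) (startpos pos : Nat) (newitem : Int × Int),
      h.length - pos ≤ n → pos < h.length →
      (pvSiftupLoop h startpos pos newitem).Perm (h.set pos newitem) from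
    H (h.length - pos) h startpos pos newitem le_rfl hp
  intro n
  induction n with
  | zero => intro h sp pos ni hle hp; omega
  | succ n IH =>
    intro h sp pos ni hle hp
    rw [pvSiftupLoop]
    split_ifs with hc
    · obtain ⟨hcl, hgt, -⟩ := pvChild_facts h pos hc
      have hlen2 : (h.set pos (h[pvChild h pos]!)).length - pvChild h pos ≤ n := by
        rw [List.length_set]; omega
      have h1 := IH (h.set pos (h[pvChild h pos]!)) sp (pvChild h pos) ni hlen2 (by simpa using hcl)
      refine h1.trans ?_
      rw [getElem!_pos h _ hcl]
      exact set_set_perm h pos (pvChild h pos) hp hcl (by omega) ni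
    · exact siftdown_perm h sp pos ni hp

theorem siftupLoop_isHeap (h : List (Int × Int)) (pos : Nat) (newitem : Int × Int) (hp : pos < h.length)
    (J1 : ∀ i c : Nat, (c = 2 * i + 1 ∨ c = 2 * i + 2) → (hc : c < h.length) → (hi : i < h.length) →
      i ≠ pos → c ≠ pos → pvHLt (h[c]'hc) (h[i]'hi) = false)
    (J2 : ∀ c : Nat, (c = 2 * pos + 1 ∨ c = 2 * pos + 2) → (hc : c < h.length) → 0 < pos →
      (hpp : (pos - 1) / 2 < h.length) → pvHLt (h[c]'hc) (h[(pos - 1) / 2]'hpp) = false) :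
    IsHeap (pvSiftupLoop h 0 pos newitem) := by
  suffices H : ∀ n (h : List (Int × Int)) (pos : Nat) (newitem : Int × Int),
      h.length - pos ≤ n → pos < h.length →
      (∀ i c : Nat, (c = 2 * i + 1 ∨ c = 2 * i + 2) → (hc : c < h.length) → (hi : i < h.length) →
        i ≠ pos → c ≠ pos → pvHLt (h[c]'hc) (h[i]'hi) = false) →
      (∀ c : Nat, (c = 2 * pos + 1 ∨ c = 2 * pos + 2) → (hc : c < h.length) → 0 < pos →
        (hpp : (pos - 1) / 2 < h.length) → pvHLt (h[c]'hc) (h[(pos - 1) / 2]'hpp) = false) →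
      IsHeap (pvSiftupLoop h 0 pos newitem) from
    H (h.length - pos) h pos newitem le_rfl hp J1 J2
  intro n
  induction n with
  | zero => intro h pos ni hle hp; omega
  | succ n IH =>
    intro h pos ni hle hp J1 J2
    rw [pvSiftupLoop]
    split_ifs with hc
    · -- descend into the smaller child
      obtain ⟨hcl, hgt, hone⟩ := pvChild_facts h pos hc
      -- the chosen child is no larger than its sibling
      have hsib : ∀ s : Nat, (s = 2 * pos + 1 ∨ s = 2 * pos + 2) → (hs : s < h.length) →
          s ≠ pvChild h pos → pvHLt (h[s]'hs) (h[pvChild h pos]'hcl) = false := by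
        intro s hsor hs hsne
        have h21 : 2 * pos + 1 < h.length := hc
        by_cases hcond : (2 * pos + 2 < h.length && !(pvHLt h[2 * pos + 1]! h[2 * pos + 2]!)) = true
        · have hceq : pvChild h pos = 2 * pos + 2 := by simp only [pvChild]; rw [if_pos hcond]
          have hseq : s = 2 * pos + 1 := by omega
          simp only [Bool.and_eq_true, decide_eq_true_eq, Bool.not_eq_true'] at hcond
          obtain ⟨h2l, hff⟩ := hcond
          rw [getElem!_pos h _ h21, getElem!_pos h _ h2l] at hff
          subst hseq
          simp only [hceq] at hcl ⊢
          exact hff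
        · have hceq : pvChild h pos = 2 * pos + 1 := by simp only [pvChild]; rw [if_neg hcond]
          have hseq : s = 2 * pos + 2 := by omega
          have h2l : 2 * pos + 2 < h.length := by omega
          have htt : pvHLt (h[2 * pos + 1]'h21) (h[2 * pos + 2]'h2l) = true := by
            by_contra hcf
            apply hcond
            simp only [Bool.and_eq_true, decide_eq_true_eq, Bool.not_eq_true']
            refine ⟨h2l, ?_⟩
            rw [getElem!_pos h _ h21, getElem!_pos h _ h2l]
            exact Bool.eq_false_iff.mpr hcf
          subst hseq
          simp only [hceq] at hcl ⊢
          exact pvHLt_asymm htt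
      rw [getElem!_pos h _ hcl]
      have hlen2 : (h.set pos (h[pvChild h pos]'hcl)).length - pvChild h pos ≤ n := by
        rw [List.length_set]; omega
      apply IH (h.set pos (h[pvChild h pos]'hcl)) (pvChild h pos) ni hlen2 (by simpa using hcl)
      · -- J1'
        intro i c hor hc' hi' hip hcp
        have hln : (h.set pos (h[pvChild h pos]'hcl)).length = h.length := by simp
        by_cases hcpos : c = pos
        · -- c = pos: i is pos's parent, the moved-up child stays above it
          have hieq : i = (pos - 1) / 2 := by omega
          subst hcpos
          rw [getElem_set_eq', getElem_set_ne' _ _ _ _ hi' (by omega)]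
          subst hieq
          exact J2 (pvChild h c) hone hcl (by omega) (by omega)
        · by_cases hipos : i = pos
          · -- i = pos: c is the sibling of the chosen child
            subst hipos
            rw [getElem_set_ne' _ _ _ _ hc' (by omega), getElem_set_eq']
            exact hsib c (by omega) (by omega) hcp
          · rw [getElem_set_ne' _ _ _ _ hc' (by omega), getElem_set_ne' _ _ _ _ hi' (by omega)]
            exact J1 i c hor (by omega) (by omega) hipos hcpos
      · -- J2'
        intro c hor hc' h0 hgp
        have hln : (h.set pos (h[pvChild h pos]'hcl)).length = h.length := by simp
        have hpeq : (pvChild h pos - 1) / 2 = pos := by omega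
        have hcpos : c ≠ pos := by omega
        rw [getElem_set_ne' _ _ _ _ hc' (by omega)]
        simp only [List.getElem_set]
        rw [if_pos hpeq.symm]
        exact J1 (pvChild h pos) c (by omega) (by omega) hcl (by omega) hcpos
    · -- no children left: final siftdown
      apply siftdown_isHeap h pos ni hp J1
      · intro c hor hc'
        exact absurd hc' (by omega)
      · exact J2

theorem heappush_perm (h : List (Int × Int)) (x : Int × Int) : (pvHeappush h x).Perm (x :: h) := by
  unfold pvHeappush
  have h1 := siftdown_perm (h ++ [x]) 0 h.length x (by simp)
  have h2 : (h ++ [x]).set h.length x = h ++ [x] := by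
    have hx : (h ++ [x])[h.length]'(by simp) = x := by
      rw [List.getElem_append_right (by omega)]; simp
    have h3 := List.set_getElem_self (show h.length < (h ++ [x]).length by simp)
    rwa [hx] at h3
  rw [h2] at h1
  exact h1.trans (List.perm_append_singleton x h)

theorem heappush_isHeap {h : List (Int × Int)} (hh : IsHeap h) (x : Int × Int) :
    IsHeap (pvHeappush h x) := by
  unfold pvHeappush
  apply siftdown_isHeap (h ++ [x]) h.length x (by simp)
  · intro i c hor hc hi hip hcp
    have hc' : c < h.length := by simp at hc; omega
    have hi' : i < h.length := by simp at hi; omega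
    rw [List.getElem_append_left hc', List.getElem_append_left hi']
    exact hh i c hor hc' hi'
  · intro c hor hc
    exfalso; simp at hc; omega
  · intro c hor hc h0 hpp
    exfalso; simp at hc; omega

theorem heappop_spec {h : List (Int × Int)} (hh : IsHeap h) (hne : h ≠ []) :
    (pvHeappop h).1 = h[0]'(by cases h <;> simp_all) ∧
    ((pvHeappop h).1 :: (pvHeappop h).2).Perm h ∧ IsHeap (pvHeappop h).2 := by
  rcases List.eq_nil_or_concat h with rfl | ⟨l, b, rfl⟩
  · exact absurd rfl hne
  cases l with
  | nil =>
    refine ⟨by simp [pvHeappop], by simp [pvHeappop], ?_⟩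
    intro i c hor hc hi
    simp [pvHeappop] at hc
  | cons r0 rt =>
    simp only [List.concat_eq_append] at hh ⊢
    have hpop : pvHeappop ((r0 :: rt) ++ [b]) = (r0, pvSiftupLoop (b :: rt) 0 0 b) := by
      unfold pvHeappop
      rw [List.getLast?_concat, List.dropLast_concat]
      simp
    rw [hpop]
    have hval : ∀ m : Nat, (hm : m < rt.length) →
        ((r0 :: rt) ++ [b])[m + 1]'(by simp; omega) = rt[m]'hm := by
      intro m hm
      simp [List.getElem_cons_succ, List.getElem_append_left, hm]
    refine ⟨by simp, ?_, ?_⟩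
    · have hs := siftupLoop_perm (b :: rt) 0 0 b (by simp)
      rw [List.set_cons_zero] at hs
      refine (hs.cons r0).trans ?_
      rw [List.cons_append]
      exact ((List.perm_append_singleton b rt).symm.cons r0)
    · apply siftupLoop_isHeap (b :: rt) 0 b (by simp)
      · intro i c hor hc hi hip hcp
        match i, c with
        | 0, _ => exact absurd rfl hip
        | _ + 1, 0 => exact absurd rfl hcp
        | k + 1, m + 1 =>
          have hm : m < rt.length := by simp at hc; omega
          have hk : k < rt.length := by simp at hi; omega
          have := hh (k + 1) (m + 1) hor (by simp; omega) (by simp; omega)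
          rw [hval m hm, hval k hk] at this
          simpa using this
      · intro c hor hc h0
        exact absurd h0 (by omega)

-- B-side: sortedness of the single list
def SortedPQ (l : List (Int × Int)) : Prop := l.Pairwise (fun a b => pvHLt b a = false)

theorem insort_perm (x : Int × Int) (l : List (Int × Int)) : (pvInsort x l).Perm (x :: l) := by
  induction l with
  | nil => simp [pvInsort]
  | cons y ys ih =>
    simp only [pvInsort]
    split
    · exact List.Perm.refl _
    · exact (ih.cons y).trans (List.Perm.swap x y ys)

theorem insort_sorted (x : Int × Int) : ∀ l : List (Int × Int), SortedPQ l → SortedPQ (pvInsort x l) := by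
  intro l
  induction l with
  | nil => intro _; simp [pvInsort, SortedPQ]
  | cons y ys ih =>
    intro hs
    simp only [SortedPQ, List.pairwise_cons] at hs
    obtain ⟨hy, hys⟩ := hs
    simp only [pvInsort]
    split_ifs with hxy
    · simp only [SortedPQ, List.pairwise_cons]
      refine ⟨?_, hy, hys⟩
      intro z hz
      rcases List.mem_cons.mp hz with rfl | hz
      · exact pvHLt_asymm hxy
      · exact pvHLt_trans_ft (hy z hz) hxy
    · simp only [SortedPQ, List.pairwise_cons]
      refine ⟨?_, ih hys⟩
      intro z hz
      rcases List.mem_cons.mp ((insort_perm x ys).mem_iff.mp hz) with rfl | hz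
      · simpa using hxy
      · exact hy z hz

-- the coupling invariant between A's neg_heap and B's pq
def Coupled (neg pq : List (Int × Int)) : Prop := IsHeap neg ∧ neg.Perm pq ∧ SortedPQ pq

theorem fold_couple : ∀ (ops : List Int) (neg posH pq : List (Int × Int)) (out : List Int),
    Coupled neg pq →
    (ops.foldl pvStepA (neg, posH, out)).2.2 = (ops.foldl pvStepB (pq, out)).2 := by
  intro ops
  induction ops with
  | nil => intro neg posH pq out _; rfl
  | cons op rest IH =>
    intro neg posH pq out hC
    obtain ⟨hheap, hperm, hsort⟩ := hC
    simp only [List.foldl_cons]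
    by_cases hop : op ≠ 0
    · have hstepB : pvStepB (pq, out) op = (pvInsort (|op|, op) pq, out) := by
        simp [pvStepB, hop]
      have hcoup : Coupled (pvHeappush neg (|op|, op)) (pvInsort (|op|, op) pq) :=
        ⟨heappush_isHeap hheap _,
         (heappush_perm neg _).trans ((hperm.cons _).trans (insort_perm _ pq).symm),
         insort_sorted _ pq hsort⟩
      by_cases hneg : op < 0
      · have hstepA : pvStepA (neg, posH, out) op =
            (pvHeappush neg (|op|, op), pvHeappush posH (-|op|, -op), out) := by
          simp [pvStepA, hop, hneg]
        rw [hstepA, hstepB]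
        exact IH _ _ _ _ hcoup
      · have hstepA : pvStepA (neg, posH, out) op =
            (pvHeappush neg (|op|, op), pvHeappush posH (-|op|, op), out) := by
          simp [pvStepA, hop, hneg]
        rw [hstepA, hstepB]
        exact IH _ _ _ _ hcoup
    · have hop0 : op = 0 := not_not.mp hop
      subst hop0
      cases hpq : pq with
      | nil =>
        rw [hpq] at hperm hsort
        have hnegnil : neg = [] := List.length_eq_zero_iff.mp (by simpa using hperm.length_eq)
        have hstepA : pvStepA (neg, posH, out) 0 = (neg, posH, out ++ [0]) := by
          simp [pvStepA, hnegnil]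
        have hstepB : pvStepB (([] : List (Int × Int)), out) 0 = ([], out ++ [0]) := by
          simp [pvStepB]
        rw [hstepA, hstepB]
        exact IH _ _ _ _ ⟨hheap, hperm, hsort⟩
      | cons p rest' =>
        rw [hpq] at hperm hsort
        have hne : neg ≠ [] := by
          intro hnil
          rw [hnil] at hperm
          exact absurd hperm.symm.length_eq (by simp)
        have h0 : 0 < neg.length := by cases neg <;> simp_all
        obtain ⟨hfst, hpp, hheap2⟩ := heappop_spec hheap hne
        -- the heap root equals the sorted head
        have hall : ∀ x ∈ neg, pvHLt x (neg[0]'h0) = false := by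
          intro x hx
          obtain ⟨i, hi, rfl⟩ := List.mem_iff_getElem.mp hx
          exact isHeap_root_le hheap i hi h0
        have hrootmem : (neg[0]'h0) ∈ p :: rest' := hperm.mem_iff.mp (List.getElem_mem h0)
        have ha2 : pvHLt (neg[0]'h0) p = false := by
          rcases List.mem_cons.mp hrootmem with heq | hmem
          · rw [heq]; exact pvHLt_irrefl p
          · exact (List.pairwise_cons.mp hsort).1 _ hmem
        have hpmem : p ∈ neg := hperm.symm.mem_iff.mp List.mem_cons_self
        have hroot : (neg[0]'h0) = p := pvHLt_antisymm ha2 (hall p hpmem)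
        have hstepA' : pvStepA (neg, posH, out) 0 =
            ((pvHeappop neg).2, (pvHeappop posH).2, out ++ [(pvHeappop neg).1.2]) := by
          simp [pvStepA, List.isEmpty_iff, hne]
        have hstepB' : pvStepB ((p :: rest'), out) 0 = (rest', out ++ [p.2]) := by
          simp [pvStepB]
        rw [hstepA', hstepB', hfst, hroot]
        have hperm2 : (pvHeappop neg).2.Perm rest' := by
          have := hpp.trans hperm
          rw [hfst, hroot] at this
          exact this.cons_inv
        exact IH _ _ _ _ ⟨hheap2, hperm2, (List.pairwise_cons.mp hsort).2⟩

-- ===== VERDICT (by name: the statement is the Claim_ definition above) =====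
theorem abs_heap_spec : Claim_equal_abs_heap := by
  intro operations _dom
  unfold Spec_abs_heap abs_heap abs_heap_alt
  exact fold_couple operations [] [] [] [] ⟨by intro i c _ hc hi; simp at hc, List.Perm.refl _, List.Pairwise.nil⟩
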